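-- pv_equiv track=rewrite | github.com/RasmusKoRiis/nf-core-rsvseq | bin/rsv_subtype_guess.py | score_read
-- ===== SOURCE A (Python) =====
-- def revcomp(seq: str) -> str:
--     table = str.maketrans("ACGTNacgtn", "TGCANtgcan")
--     return seq.translate(table)[::-1]
--
-- def score_read(seq: str, kmers_a, kmers_b, k: int):
--     if len(seq) < k:
--         return 0, 0
--     s_a = 0
--     s_b = 0
--     rc = revcomp(seq)
--     for source in (seq, rc):
--         for i in range(0, len(source) - k + 1):
--             kmer = source[i : i + k]
--             if "N" in kmer:
--                 continue
--             if kmer in kmers_a: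
--                 s_a += 1
--             if kmer in kmers_b:
--                 s_b += 1
--     return s_a, s_b
-- ===== SOURCE B (Python) =====
-- _RC_TABLE = str.maketrans("ACGTNacgtn", "TGCANtgcan")
--
-- def revcomp(seq: str) -> str:
--     return seq.translate(_RC_TABLE)[::-1]
--
-- def score_read(seq, kmers_a, kmers_b, k):
--     # Inverted loops: instead of sliding a window over seq and its reverse complement
--     # and testing membership, iterate over the DISTINCT candidate k-mers and count, for
--     # each, its occurrences among seq's windows; occurrences on the reverse-complement
--     # strand are occurrences of revcomp(x) in seq itself, so rc is never built.
--     if len(seq) < k: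
--         return 0, 0
--
--     def occ(p):
--         t = 0
--         for i in range(len(seq) - len(p) + 1):
--             if seq[i : i + len(p)] == p:
--                 t += 1
--         return t
--
--     def total(kset):
--         t = 0
--         for x in set(kset):
--             if len(x) == k and "N" not in x:
--                 t += occ(x) + occ(revcomp(x))
--         return t
--
--     return total(kmers_a), total(kmers_b)
-- ===== Notes on version B (the rewrite author's own statement) =====
-- stated objective: alternative
-- what changed: B inverts the loops: instead of sliding a window over seq and over the built reverse-complement read and testing membership per window, it iterates over the distinct candidate k-mers (of length k, without N) and counts each one's occurrences among seq's windows, using that occurrences on the reverse-complement strand are occurrences of revcomp(x) in seq itself, so the rc read is never built.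
-- outside the precondition, e.g. on score_read('ACG', {'CG', 'G', 'AC', 'C'}, {'ACG', 'A'}, -1): A returns (2, 0), B returns (0, 0)
import Mathlib
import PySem

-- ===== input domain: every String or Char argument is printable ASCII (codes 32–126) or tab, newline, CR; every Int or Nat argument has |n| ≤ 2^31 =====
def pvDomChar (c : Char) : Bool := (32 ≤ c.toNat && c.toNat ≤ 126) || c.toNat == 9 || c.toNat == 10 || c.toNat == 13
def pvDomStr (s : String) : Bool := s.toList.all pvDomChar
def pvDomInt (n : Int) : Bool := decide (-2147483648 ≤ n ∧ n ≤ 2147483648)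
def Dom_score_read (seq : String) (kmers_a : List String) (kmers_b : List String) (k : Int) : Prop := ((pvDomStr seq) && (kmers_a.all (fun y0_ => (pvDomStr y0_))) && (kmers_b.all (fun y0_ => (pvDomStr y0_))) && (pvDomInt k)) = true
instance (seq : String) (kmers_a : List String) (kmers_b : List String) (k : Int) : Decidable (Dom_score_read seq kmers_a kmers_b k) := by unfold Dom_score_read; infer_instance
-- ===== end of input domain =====

-- B inverts the loops: it iterates over the distinct candidate k-mers and counts each one's
-- occurrences among seq's windows (rc-strand hits = occurrences of revcomp(x) in seq), instead of
-- sliding a window over seq and over the built reverse-complement read with per-window membership.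

-- ===== PORT A =====
-- str.maketrans("ACGTNacgtn", "TGCANtgcan") + translate: char-by-char map, others unchanged (exact)
def pvRcChar (c : Char) : Char :=
  if c = 'A' then 'T' else if c = 'C' then 'G' else if c = 'G' then 'C' else if c = 'T' then 'A'
  else if c = 'N' then 'N' else if c = 'a' then 't' else if c = 'c' then 'g' else if c = 'g' then 'c'
  else if c = 't' then 'a' else if c = 'n' then 'n' else c

-- revcomp: translate then [::-1] (reverse)
def revcomp (s : String) : String := String.ofList ((s.toList.map pvRcChar).reverse)

def score_read (seq : String) (kmers_a : List String) (kmers_b : List String) (k : Int) : Int × Int :=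
  if PySem.Str.len seq < k then (0, 0)
  else
    let rc := revcomp seq
    [seq, rc].foldl (fun s source =>
      (PySem.List.pyRange 0 (PySem.Str.len source - k + 1) 1).foldl (fun s i =>
        let kmer := PySem.Str.slice source (some i) (some (i + k))
        if PySem.Str.isIn "N" kmer then s
        else
          let s := if kmer ∈ kmers_a then (s.1 + 1, s.2) else s
          if kmer ∈ kmers_b then (s.1, s.2 + 1) else s) s) ((0 : Int), (0 : Int))

-- ===== PORT B =====
-- occ(p): for i in range(len(seq)-len(p)+1): if seq[i:i+len(p)] == p: t += 1
def pvOcc (seq p : String) : Int :=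
  (PySem.List.pyRange 0 (PySem.Str.len seq - PySem.Str.len p + 1) 1).foldl
    (fun t i => if PySem.Str.slice seq (some i) (some (i + PySem.Str.len p)) = p then t + 1 else t) 0

-- total(kset): for x in set(kset): if len(x)==k and "N" not in x: t += occ(x)+occ(revcomp(x))
def pvTotal (seq : String) (k : Int) (kset : List String) : Int :=
  (PySem.Set.ofList kset).foldl
    (fun t x =>
      if PySem.Str.len x = k ∧ PySem.Str.isIn "N" x = false then t + pvOcc seq x + pvOcc seq (revcomp x)
      else t) 0

def score_read_alt (seq : String) (kmers_a : List String) (kmers_b : List String) (k : Int) : Int × Int :=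
  if PySem.Str.len seq < k then (0, 0)
  else (pvTotal seq k kmers_a, pvTotal seq k kmers_b)

-- ===== PRECONDITION & SPEC =====
-- Pre_ restricts to k ≥ 0, the natural domain of a k-mer length; for negative k Python's
-- negative-stop slicing seq[i:i+k] makes A's window loops read unrelated slices, so B's
-- count-by-kmer pass differs there (A still returns a value; see the cite in claim.json).
def Pre_score_read (seq : String) (kmers_a : List String) (kmers_b : List String) (k : Int) : Prop := 0 ≤ k
instance (seq : String) (kmers_a : List String) (kmers_b : List String) (k : Int) : Decidable (Pre_score_read seq kmers_a kmers_b k) := by unfold Pre_score_read; infer_instance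
def pvWitness_score_read : String × List String × List String × Int := ("ACGT", ["AC", "GT"], ["CG"], 2)

def Spec_score_read (seq : String) (kmers_a : List String) (kmers_b : List String) (k : Int) (out : Int × Int) : Prop := out = score_read_alt seq kmers_a kmers_b k
instance (seq : String) (kmers_a : List String) (kmers_b : List String) (k : Int) (out : Int × Int) : Decidable (Spec_score_read seq kmers_a kmers_b k out) := by unfold Spec_score_read; infer_instance

-- ===== CLAIM (what is proved, stated in full; the proofs are below) =====
def Claim_equal_score_read : Prop := ∀ (seq : String) (kmers_a : List String) (kmers_b : List String) (k : Int), Dom_score_read seq kmers_a kmers_b k → Pre_score_read seq kmers_a kmers_b k → Spec_score_read seq kmers_a kmers_b k (score_read seq kmers_a kmers_b k)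

-- ===== LEMMAS AND PROOFS =====

-- the k-length window of l at offset j
def pvWin (l : List Char) (K j : Nat) : List Char := (l.drop j).take K

theorem revcomp_toList (s : String) : (revcomp s).toList = (s.toList.map pvRcChar).reverse := by
  simp [revcomp]

-- rc's window at j is the reverse complement of seq's window at n-K-j
theorem win_revcomp (l : List Char) (K j : Nat) (hK : K ≤ l.length) (hj : j ≤ l.length - K) :
    pvWin ((l.map pvRcChar).reverse) K j = ((pvWin l K (l.length - K - j)).map pvRcChar).reverse := by
  unfold pvWin
  rw [List.drop_reverse, List.take_reverse, List.drop_take, List.map_take, List.map_drop]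
  congr 2 <;> simp <;> omega

-- the list of k-mer strings of source, in loop order
def pvWins (source : String) (K : Nat) : List String :=
  (List.range (source.toList.length - K + 1)).map (fun j => String.ofList (pvWin source.toList K j))

def pvG (ks : List String) (w : String) : Int :=
  if PySem.Str.isIn "N" w then 0 else if w ∈ ks then 1 else 0

-- a fold of A's loop body over any index list, as a sum over the k-mer strings
theorem foldl_stepA (ka kb : List String) (f : Nat → String) (l : List Nat) (p : Int × Int) :
    l.foldl (fun s j =>
        let kmer := f j
        if PySem.Str.isIn "N" kmer then s
        else
          let s := if kmer ∈ ka then (s.1 + 1, s.2) else s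
          if kmer ∈ kb then (s.1, s.2 + 1) else s) p
      = (p.1 + ((l.map f).map (pvG ka)).sum, p.2 + ((l.map f).map (pvG kb)).sum) := by
  induction l generalizing p with
  | nil => simp
  | cons a t ih =>
    simp only [List.foldl_cons, List.map_cons, List.sum_cons]
    rw [ih]
    unfold pvG
    split_ifs <;> simp only [Prod.mk.injEq] <;> constructor <;> simp <;> ring

-- the loop's slice at index j is the j-th window string
theorem slice_eq_win (source : String) (k : Int) (hk : 0 ≤ k) (j : Nat) :
    PySem.Str.slice source (some ((0 : Int) + j)) (some ((0 : Int) + j + k))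
      = String.ofList (pvWin source.toList k.toNat j) := by
  apply String.toList_inj.mp
  rw [String.toList_ofList, PySem.Str.toList_slice, PySem.Chars.slice_eq_listSlice]
  have h0 : (0 : Int) + (j : Int) = (j : Int) := by ring
  rw [h0]
  have h1 : (j : Int) + k = (j : Int) + (k.toNat : Int) := by
    rw [Int.toNat_of_nonneg hk]
  rw [h1, PySem.List.slice_natCast_add]
  rfl

theorem range_map_slice (source : String) (k : Int) (hk : 0 ≤ k) (M : Nat) :
    (List.range M).map (fun j : Nat =>
        PySem.Str.slice source (some ((0 : Int) + j)) (some ((0 : Int) + j + k)))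
      = (List.range M).map (fun j => String.ofList (pvWin source.toList k.toNat j)) := by
  apply List.map_congr_left
  intro j _
  exact slice_eq_win source k hk j

theorem pyRangeM (source : String) (k : Int) (hk : 0 ≤ k) (hlen : k ≤ (source.toList.length : Int)) :
    ((PySem.Str.len source - k + 1) - 0).toNat = source.toList.length - k.toNat + 1 := by
  have hlenI : PySem.Str.len source = (source.toList.length : Int) := by simp [pysem]
  rw [hlenI]; omega

theorem range_reverse (M : Nat) :
    (List.range M).reverse = (List.range M).map (fun i => M - 1 - i) := by
  rw [List.range_eq_range', List.reverse_range']
  simp [← List.range_eq_range']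

-- Σ over rc's windows = Σ over seq's windows of f ∘ revcomp (any f into Int)
theorem sum_rc_windows (seq : String) (f : String → Int) (K : Nat) (hK : K ≤ seq.toList.length) :
    ((pvWins (revcomp seq) K).map f).sum
      = ((pvWins seq K).map (fun w => f (revcomp w))).sum := by
  have hrclen : (revcomp seq).toList.length = seq.toList.length := by
    rw [revcomp_toList]; simp
  unfold pvWins
  rw [hrclen]
  conv_rhs => rw [← List.sum_reverse_int, ← List.map_reverse, ← List.map_reverse, range_reverse]
  simp only [List.map_map]
  apply congrArg List.sum
  apply List.map_congr_left
  intro j hj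
  have hj' : j < seq.toList.length - K + 1 := List.mem_range.mp hj
  have hjle : j ≤ seq.toList.length - K := by omega
  simp only [Function.comp_apply]
  congr 1
  apply String.toList_inj.mp
  simp only [String.toList_ofList, revcomp_toList]
  have hMj : seq.toList.length - K + 1 - 1 - j = seq.toList.length - K - j := by omega
  rw [hMj]
  exact win_revcomp seq.toList K j hK hjle

theorem loopA_eq (source : String) (kmers_a kmers_b : List String) (k : Int) (hk : 0 ≤ k)
    (hlen : k ≤ (source.toList.length : Int)) (p : Int × Int) :
    (PySem.List.pyRange 0 (PySem.Str.len source - k + 1) 1).foldl (fun s i =>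
        let kmer := PySem.Str.slice source (some i) (some (i + k))
        if PySem.Str.isIn "N" kmer then s
        else
          let s := if kmer ∈ kmers_a then (s.1 + 1, s.2) else s
          if kmer ∈ kmers_b then (s.1, s.2 + 1) else s) p
      = (p.1 + ((pvWins source k.toNat).map (pvG kmers_a)).sum,
         p.2 + ((pvWins source k.toNat).map (pvG kmers_b)).sum) := by
  rw [PySem.List.pyRange_one, pyRangeM source k hk hlen, List.foldl_map]
  refine (foldl_stepA kmers_a kmers_b
    (fun j : Nat => PySem.Str.slice source (some ((0 : Int) + j)) (some ((0 : Int) + j + k)))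
    (List.range (source.toList.length - k.toNat + 1)) p).trans ?_
  rw [range_map_slice source k hk]
  rfl

theorem pvRcChar_invol (c : Char) : pvRcChar (pvRcChar c) = c := by
  by_cases h1 : c = 'A'; · subst h1; decide
  by_cases h2 : c = 'C'; · subst h2; decide
  by_cases h3 : c = 'G'; · subst h3; decide
  by_cases h4 : c = 'T'; · subst h4; decide
  by_cases h5 : c = 'N'; · subst h5; decide
  by_cases h6 : c = 'a'; · subst h6; decide
  by_cases h7 : c = 'c'; · subst h7; decide
  by_cases h8 : c = 'g'; · subst h8; decide
  by_cases h9 : c = 't'; · subst h9; decide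
  by_cases h10 : c = 'n'; · subst h10; decide
  have hid : pvRcChar c = c := by
    unfold pvRcChar
    simp [h1, h2, h3, h4, h5, h6, h7, h8, h9, h10]
  rw [hid, hid]

theorem revcomp_revcomp (w : String) : revcomp (revcomp w) = w := by
  apply String.toList_inj.mp
  rw [revcomp_toList, revcomp_toList]
  simp [List.map_reverse, List.map_map, Function.comp_def, pvRcChar_invol]

theorem len_revcomp (w : String) : (revcomp w).toList.length = w.toList.length := by
  rw [revcomp_toList]; simp

-- generic: a counting fold is a 0/1 sum
theorem foldl_count {α : Type} (q : α → Prop) [DecidablePred q] (l : List α) (t : Int) :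
    l.foldl (fun t a => if q a then t + 1 else t) t
      = t + (l.map (fun a => if q a then (1 : Int) else 0)).sum := by
  induction l generalizing t with
  | nil => simp
  | cons a tl ih =>
    simp only [List.foldl_cons, List.map_cons, List.sum_cons]
    rw [ih]
    split_ifs <;> ring

-- generic: a filtered accumulation fold is a sum over the filtered list
theorem foldl_filter_sum {α : Type} (q : α → Prop) [DecidablePred q] (f g : α → Int)
    (l : List α) (t : Int) :
    l.foldl (fun t a => if q a then t + f a + g a else t) t
      = t + ((l.filter (fun a => decide (q a))).map (fun a => f a + g a)).sum := by
  induction l generalizing t with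
  | nil => simp
  | cons a tl ih =>
    simp only [List.foldl_cons, List.filter_cons]
    by_cases h : q a
    · simp only [h, if_pos, decide_true, List.map_cons, List.sum_cons]
      rw [ih]; ring
    · simp only [h, if_neg, not_false_iff, decide_false]
      rw [ih]; simp

-- nodup count: Σ_{x∈S} [w = x] = [w ∈ S]
theorem sum_indicator_nodup (S : List String) (hS : S.Nodup) (w : String) :
    (S.map (fun x => if w = x then (1 : Int) else 0)).sum = if w ∈ S then 1 else 0 := by
  induction S with
  | nil => simp
  | cons a tl ih =>
    simp only [List.map_cons, List.sum_cons, List.mem_cons]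
    have htl := ih hS.of_cons
    by_cases h : w = a
    · subst h
      have : w ∉ tl := (List.nodup_cons.mp hS).1
      simp [this, htl]
    · simp [h, htl]

-- double-sum swap over lists (Int-valued)
theorem sum_swap {α β : Type} (S : List α) (W : List β) (f : α → β → Int) :
    (S.map (fun x => (W.map (fun w => f x w)).sum)).sum
      = (W.map (fun w => (S.map (fun x => f x w)).sum)).sum := by
  induction S with
  | nil => simp
  | cons a tl ih =>
    simp only [List.map_cons, List.sum_cons, ih]
    rw [← PySem.List.sum_map_add_int]

-- the candidate set: distinct kmers of length k without N
def pvS (ks : List String) (k : Int) : List String :=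
  (PySem.Set.ofList ks).filter
    (fun x => decide (PySem.Str.len x = k ∧ PySem.Str.isIn "N" x = false))

theorem nodup_pvS (ks : List String) (k : Int) : (pvS ks k).Nodup :=
  (PySem.Set.nodup_ofList ks).filter _

theorem mem_pvS {ks : List String} {k : Int} {x : String} (hx : x ∈ pvS ks k) :
    PySem.Str.len x = k ∧ PySem.Str.isIn "N" x = false := by
  have := (List.mem_filter.mp hx).2
  exact of_decide_eq_true this

theorem mem_pvS_iff {ks : List String} {k : Int} {x : String} :
    x ∈ pvS ks k ↔ (x ∈ ks ∧ PySem.Str.len x = k ∧ PySem.Str.isIn "N" x = false) := by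
  unfold pvS
  rw [List.mem_filter, PySem.Set.mem_ofList]
  simp

theorem len_eq_int (s : String) : PySem.Str.len s = (s.toList.length : Int) := by simp [pysem]

-- occ p, for |p| = k, is the 0/1 sum over seq's windows
theorem occ_eq (seq p : String) (k : Int) (hk : 0 ≤ k)
    (hlen : k ≤ (seq.toList.length : Int)) (hp : PySem.Str.len p = k) :
    pvOcc seq p = ((pvWins seq k.toNat).map (fun w => if w = p then (1 : Int) else 0)).sum := by
  unfold pvOcc
  rw [hp, PySem.List.pyRange_one, pyRangeM seq k hk hlen, List.foldl_map]
  rw [foldl_count (fun j : Nat =>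
      PySem.Str.slice seq (some ((0 : Int) + j)) (some ((0 : Int) + j + k)) = p)]
  rw [zero_add]
  unfold pvWins
  rw [List.map_map]
  apply congrArg List.sum
  apply List.map_congr_left
  intro j _
  simp only [Function.comp_apply, slice_eq_win seq k hk j]

-- B's per-set loop as a sum over pvS
theorem total_eq (seq : String) (k : Int) (ks : List String) :
    pvTotal seq k ks
      = ((pvS ks k).map (fun x => pvOcc seq x + pvOcc seq (revcomp x))).sum := by
  unfold pvTotal pvS
  rw [foldl_filter_sum (fun x => PySem.Str.len x = k ∧ PySem.Str.isIn "N" x = false)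
      (fun x => pvOcc seq x) (fun x => pvOcc seq (revcomp x))]
  rw [zero_add]

-- windows of seq have length exactly K
theorem len_win {seq : String} {K : Nat} {w : String} (hK : K ≤ seq.toList.length)
    (hw : w ∈ pvWins seq K) : w.toList.length = K := by
  unfold pvWins at hw
  rcases List.mem_map.mp hw with ⟨j, hj, rfl⟩
  have hj' : j < seq.toList.length - K + 1 := List.mem_range.mp hj
  simp only [String.toList_ofList, pvWin, List.length_take, List.length_drop]
  omega

-- pvG as an indicator of membership in pvS, for a window of the right length
theorem pvG_ind (ks : List String) (k : Int) (hk : 0 ≤ k) (w : String)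
    (hw : w.toList.length = k.toNat) :
    pvG ks w = if w ∈ pvS ks k then 1 else 0 := by
  have hlenw : PySem.Str.len w = k := by
    rw [len_eq_int, hw]; omega
  unfold pvG
  by_cases hN : PySem.Str.isIn "N" w = true
  · have : w ∉ pvS ks k := by
      intro hmem
      have := (mem_pvS hmem).2
      rw [hN] at this; cases this
    rw [if_pos hN, if_neg this]
  · have hN' : PySem.Str.isIn "N" w = false := by
      cases h : PySem.Str.isIn "N" w
      · rfl
      · exact absurd h hN
    rw [hN']
    simp only [Bool.false_eq_true, if_false]
    by_cases hm : w ∈ ks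
    · rw [if_pos hm, if_pos (mem_pvS_iff.mpr ⟨hm, hlenw, hN'⟩)]
    · rw [if_neg hm, if_neg (fun hmem => hm (mem_pvS_iff.mp hmem).1)]

-- Σ over seq's windows of pvG = Σ over pvS of occ
theorem sumA_seq (seq : String) (ks : List String) (k : Int) (hk : 0 ≤ k)
    (hlen : k ≤ (seq.toList.length : Int)) :
    ((pvWins seq k.toNat).map (pvG ks)).sum = ((pvS ks k).map (fun x => pvOcc seq x)).sum := by
  have hK : k.toNat ≤ seq.toList.length := by omega
  have h1 : ((pvWins seq k.toNat).map (pvG ks)).sum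
      = ((pvWins seq k.toNat).map (fun w =>
          ((pvS ks k).map (fun x => if w = x then (1 : Int) else 0)).sum)).sum := by
    apply congrArg List.sum
    apply List.map_congr_left
    intro w hw
    rw [pvG_ind ks k hk w (len_win hK hw), sum_indicator_nodup _ (nodup_pvS ks k)]
  rw [h1, ← sum_swap]
  apply congrArg List.sum
  apply List.map_congr_left
  intro x hx
  exact (occ_eq seq x k hk hlen (mem_pvS hx).1).symm

-- Σ over rc's windows of pvG = Σ over pvS of occ ∘ revcomp
theorem sumA_rc (seq : String) (ks : List String) (k : Int) (hk : 0 ≤ k)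
    (hlen : k ≤ (seq.toList.length : Int)) :
    ((pvWins (revcomp seq) k.toNat).map (pvG ks)).sum
      = ((pvS ks k).map (fun x => pvOcc seq (revcomp x))).sum := by
  have hK : k.toNat ≤ seq.toList.length := by omega
  rw [sum_rc_windows seq (pvG ks) k.toNat hK]
  have h1 : ((pvWins seq k.toNat).map (fun w => pvG ks (revcomp w))).sum
      = ((pvWins seq k.toNat).map (fun w =>
          ((pvS ks k).map (fun x => if w = revcomp x then (1 : Int) else 0)).sum)).sum := by
    apply congrArg List.sum
    apply List.map_congr_left
    intro w hw
    have hwl : (revcomp w).toList.length = k.toNat := by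
      rw [len_revcomp]; exact len_win hK hw
    rw [pvG_ind ks k hk (revcomp w) hwl]
    have hmap : (pvS ks k).map (fun x => if w = revcomp x then (1 : Int) else 0)
        = (pvS ks k).map (fun x => if revcomp w = x then (1 : Int) else 0) := by
      apply List.map_congr_left
      intro x _
      have hiff : (w = revcomp x) ↔ (revcomp w = x) :=
        ⟨fun h => by rw [h, revcomp_revcomp], fun h => by rw [← h, revcomp_revcomp]⟩
      simp only [hiff]
    rw [hmap, sum_indicator_nodup _ (nodup_pvS ks k)]
  rw [h1, ← sum_swap]
  apply congrArg List.sum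
  apply List.map_congr_left
  intro x hx
  have hlx : PySem.Str.len (revcomp x) = k := by
    rw [len_eq_int, len_revcomp, ← len_eq_int]
    exact (mem_pvS hx).1
  exact (occ_eq seq (revcomp x) k hk hlen hlx).symm

-- ===== VERDICT (by name: the statement is the Claim_ definition above) =====
theorem score_read_spec : Claim_equal_score_read := by
  intro seq kmers_a kmers_b k _ hk
  unfold Spec_score_read
  by_cases hg : PySem.Str.len seq < k
  · simp only [score_read, score_read_alt, if_pos hg]
  · have hlen : k ≤ (seq.toList.length : Int) := by
      rw [← len_eq_int]; exact not_lt.mp hg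
    have hK : k.toNat ≤ seq.toList.length := by omega
    unfold score_read score_read_alt
    rw [if_neg hg, if_neg hg]
    simp only [List.foldl_cons, List.foldl_nil]
    have hlenrc : k ≤ ((revcomp seq).toList.length : Int) := by
      rw [len_revcomp]; exact hlen
    rw [loopA_eq seq kmers_a kmers_b k hk hlen,
        loopA_eq (revcomp seq) kmers_a kmers_b k hk hlenrc]
    rw [total_eq seq k kmers_a, total_eq seq k kmers_b,
        PySem.List.sum_map_add_int, PySem.List.sum_map_add_int,
        ← sumA_seq seq kmers_a k hk hlen, ← sumA_rc seq kmers_a k hk hlen,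
        ← sumA_seq seq kmers_b k hk hlen, ← sumA_rc seq kmers_b k hk hlen]
    simp only [Prod.mk.injEq]
    constructor <;> ring
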